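-- pv_equiv track=rewrite | github.com/Azure/azure-cli | tools/automation/cli_linter/rules/help_rules.py | _process_command_args
-- ===== SOURCE A (Python) =====
-- def _process_command_args(command_args):
--     result_args = []
--     new_commands = []
--     unwanted_chars = "$()`"
--     control_operators = ["&&","||"]
--
--     for arg in command_args: # strip unnecessary punctuation, otherwise arg validation could fail.
--         if arg in control_operators: # handle cases where multiple commands are connected by control operators.
--             idx = command_args.index(arg)
--             maybe_new_command = " ".join(command_args[idx:])
--
--             idx = maybe_new_command.find("az ")
--             if idx != -1:
--                 new_commands.append(maybe_new_command[idx:])  # remaining command is in fact a new command / commands.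
--             break
--
--         arg = arg.strip(unwanted_chars)
--         if arg.startswith("az "):  # store any new commands
--             new_commands.append(arg)
--         result_args.append(arg)
--
--     return result_args, new_commands
-- ===== SOURCE B (Python) =====
-- def _process_command_args(command_args):
--     # Backward scan: walk the indices from the end; hitting a control operator
--     # discards everything gathered so far (it lies after that operator) and
--     # records the operator's position, so what survives is exactly the prefix
--     # before the FIRST operator. Results are gathered reversed and flipped once.
--     stripped = []
--     cmds = []
--     op_idx = None
--     for i in range(len(command_args) - 1, -1, -1):
--         a = command_args[i]
--         if a in ("&&", "||"):
--             op_idx = i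
--             stripped = []
--             cmds = []
--         else:
--             s = a.strip("$()`")
--             stripped.append(s)
--             if s.startswith("az "):
--                 cmds.append(s)
--     result_args = stripped[::-1]
--     new_commands = cmds[::-1]
--     if op_idx is not None:
--         tail = " ".join(command_args[op_idx:])
--         pos = tail.find("az ")
--         if pos != -1:
--             new_commands.append(tail[pos:])
--     return result_args, new_commands
-- ===== Notes on version B (the rewrite author's own statement) =====
-- stated objective: alternative
-- what changed: A scans forward and breaks at the first control operator (re-finding it with list.index and slicing the original list); B scans the indices backward, resetting its accumulators whenever it meets an operator so the prefix before the first operator is what survives, then flips the reversed accumulators once and joins the tail from the recorded position.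
import Mathlib
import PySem

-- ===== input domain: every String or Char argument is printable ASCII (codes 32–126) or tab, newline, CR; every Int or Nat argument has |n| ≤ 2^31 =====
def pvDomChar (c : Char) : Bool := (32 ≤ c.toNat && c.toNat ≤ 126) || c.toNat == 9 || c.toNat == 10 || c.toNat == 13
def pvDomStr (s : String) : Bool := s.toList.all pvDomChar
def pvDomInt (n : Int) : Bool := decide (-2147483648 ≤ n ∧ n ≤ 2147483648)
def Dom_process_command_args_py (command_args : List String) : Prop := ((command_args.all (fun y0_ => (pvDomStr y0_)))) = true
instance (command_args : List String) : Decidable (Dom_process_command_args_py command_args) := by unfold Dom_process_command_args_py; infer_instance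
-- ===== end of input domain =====

-- B replaces A's forward loop with break/list.index by a backward index scan that resets
-- its accumulators at each control operator; objective: alternative (same cost, different
-- traversal order and decomposition).

-- ===== PORT A =====
-- the `break` branch of A's loop: command_args.index(arg), join the tail, find "az "
def pvTailA (full : List String) (arg : String) : List String :=
  match PySem.List.index? full arg with
  | some idx =>
      let m := PySem.Str.join " " (full.drop idx)       -- " ".join(command_args[idx:])
      let j := PySem.Str.find m "az "
      if j ≠ -1 then [PySem.Str.slice m (some j) none] else []
  | none => []   -- Python's list.index would raise ValueError; unreachable: arg comes from full

def pvLoopA (full : List String) : List String → List String → List String → List String × List String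
  | [], res, newc => (res, newc)
  | arg :: rest, res, newc =>
    if arg = "&&" ∨ arg = "||" then
      (res, newc ++ pvTailA full arg)                    -- the break branch
    else
      let a := PySem.Str.stripChars arg "$()`"
      if PySem.Str.startswith a "az " then
        pvLoopA full rest (res ++ [a]) (newc ++ [a])
      else
        pvLoopA full rest (res ++ [a]) newc

def process_command_args_py (command_args : List String) : List String × List String :=
  pvLoopA command_args command_args [] []

-- ===== PORT B =====
-- one iteration of B's backward loop body (state: stripped, cmds, op_idx)
def pvStepB (l : List String) (st : List String × List String × Option Int) (i : Int) :
    List String × List String × Option Int :=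
  let a := PySem.List.pyGetD l i ""    -- command_args[i]; i is in range for every generated index
  if a = "&&" ∨ a = "||" then
    (([] : List String), ([] : List String), some i)
  else
    let s := PySem.Str.stripChars a "$()`"
    (st.1 ++ [s], (if PySem.Str.startswith s "az " then st.2.1 ++ [s] else st.2.1), st.2.2)

def process_command_args_py_alt (command_args : List String) : List String × List String :=
  let st := (PySem.List.pyRange ((command_args.length : Int) - 1) (-1) (-1)).foldl
              (pvStepB command_args) ([], [], none)
  let result_args := st.1.reverse                       -- stripped[::-1]
  let new_commands := st.2.1.reverse                    -- cmds[::-1]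
  match st.2.2 with
  | none => (result_args, new_commands)
  | some i =>
      let tail := PySem.Str.join " " (PySem.List.slice command_args (some i) none)
      let pos := PySem.Str.find tail "az "
      (result_args,
        if pos ≠ -1 then new_commands ++ [PySem.Str.slice tail (some pos) none] else new_commands)

-- ===== PRECONDITION & SPEC =====
def Spec_process_command_args_py (command_args : List String) (out : List String × List String) : Prop := out = process_command_args_py_alt command_args
instance (command_args : List String) (out : List String × List String) : Decidable (Spec_process_command_args_py command_args out) := by unfold Spec_process_command_args_py; infer_instance

-- ===== CLAIM (what is proved, stated in full; the proofs are below) =====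
def Claim_equal_process_command_args_py : Prop := ∀ (command_args : List String), Dom_process_command_args_py command_args → Spec_process_command_args_py command_args (process_command_args_py command_args)

-- ===== LEMMAS AND PROOFS =====

-- A's loop over a suffix with no control operator.
lemma pvLoopA_no_op (full : List String) :
    ∀ (rest res newc : List String),
      (∀ a ∈ rest, ¬(a = "&&" ∨ a = "||")) →
      pvLoopA full rest res newc =
        (res ++ rest.map (fun a => PySem.Str.stripChars a "$()`"),
         newc ++ (rest.map (fun a => PySem.Str.stripChars a "$()`")).filter
                   (fun a => PySem.Str.startswith a "az ")) := by
  intro rest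
  induction rest with
  | nil => intro res newc _; simp [pvLoopA]
  | cons arg rest ih =>
      intro res newc h
      have hop : ¬(arg = "&&" ∨ arg = "||") := h arg (by simp)
      have hrest : ∀ a ∈ rest, ¬(a = "&&" ∨ a = "||") := fun a ha => h a (by simp [ha])
      simp [pvLoopA, hop, ih _ _ hrest, List.filter_cons]
      split_ifs <;> simp

-- A's loop when the remaining input is an operator-free prefix followed by an operator.
lemma pvLoopA_op (full : List String) :
    ∀ (pre : List String), (∀ a ∈ pre, ¬(a = "&&" ∨ a = "||")) →
      ∀ (op : String), (op = "&&" ∨ op = "||") →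
      ∀ (suf res newc : List String),
      pvLoopA full (pre ++ op :: suf) res newc =
        (res ++ pre.map (fun a => PySem.Str.stripChars a "$()`"),
         (newc ++ (pre.map (fun a => PySem.Str.stripChars a "$()`")).filter
                    (fun a => PySem.Str.startswith a "az ")) ++ pvTailA full op) := by
  intro pre
  induction pre with
  | nil => intro _ op hop suf res newc; simp [pvLoopA, hop]
  | cons arg pre ih =>
      intro h op hop suf res newc
      have hargop : ¬(arg = "&&" ∨ arg = "||") := h arg (by simp)
      have hpre : ∀ a ∈ pre, ¬(a = "&&" ∨ a = "||") := fun a ha => h a (by simp [ha])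
      simp [pvLoopA, hargop, ih hpre op hop, List.filter_cons]
      split_ifs <;> simp

-- B's backward loop over the indices m-1, …, 0 when no element before position m is an
-- operator: it appends the stripped prefix reversed and never touches op_idx.
lemma pvFoldB_no_op (l : List String) :
    ∀ (m : ℕ) (hm : m ≤ l.length),
      (∀ j : ℕ, (hj : j < m) → ¬(l[j]'(by omega) = "&&" ∨ l[j]'(by omega) = "||")) →
      ∀ (st : List String × List String × Option Int),
      (PySem.List.pyRange 0 (m : Int) 1).reverse.foldl (pvStepB l) st =
        (st.1 ++ ((l.take m).map (fun a => PySem.Str.stripChars a "$()`")).reverse,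
         st.2.1 ++ (((l.take m).map (fun a => PySem.Str.stripChars a "$()`")).filter
                      (fun a => PySem.Str.startswith a "az ")).reverse,
         st.2.2) := by
  intro m
  induction m with
  | zero => intro _ _ st; simp [PySem.List.pyRange_one_eq_nil]
  | succ m ih =>
      intro hm h st
      have hrange : PySem.List.pyRange 0 ((m + 1 : ℕ) : Int) 1 =
          PySem.List.pyRange 0 (m : Int) 1 ++ [(m : Int)] := by
        have := PySem.List.pyRange_one_succ_right (a := 0) (b := (m : Int)) (by positivity)
        push_cast
        rw [← this]
      rw [hrange, List.reverse_append]
      simp only [List.reverse_singleton, List.singleton_append, List.foldl_cons]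
      have hmlt : m < l.length := by omega
      have hget : PySem.List.pyGetD l (m : Int) "" = l[m] := by
        rw [PySem.List.pyGetD_natCast]
        simp [List.getD, hmlt]
      have hopm : ¬(l[m] = "&&" ∨ l[m] = "||") := h m (by omega)
      have hstep : pvStepB l st (m : Int) =
          (st.1 ++ [PySem.Str.stripChars l[m] "$()`"],
           (if PySem.Str.startswith (PySem.Str.stripChars l[m] "$()`") "az "
            then st.2.1 ++ [PySem.Str.stripChars l[m] "$()`"] else st.2.1),
           st.2.2) := by
        simp [pvStepB, hget, hopm]
      rw [hstep, ih (by omega) (fun j hj => h j (by omega))]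
      have hkey : (l.map (fun a => PySem.Str.stripChars a "$()`")).take (m + 1) =
          (l.map (fun a => PySem.Str.stripChars a "$()`")).take m ++
            [PySem.Str.stripChars l[m] "$()`"] := by
        rw [List.take_add_one]
        simp [hmlt]
      simp [List.map_take, hkey, List.filter_append, List.filter_cons]
      split_ifs <;> simp

-- B's full backward fold when position i holds the FIRST operator: everything gathered
-- beyond i is discarded by the reset, leaving the stripped prefix and op_idx = i.
lemma pvFoldB_op (l : List String) (i : ℕ) (hi : i < l.length)
    (hop : l[i] = "&&" ∨ l[i] = "||")
    (hpre : ∀ j : ℕ, (hj : j < i) → ¬(l[j]'(by omega) = "&&" ∨ l[j]'(by omega) = "||")) :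
    (PySem.List.pyRange 0 (l.length : Int) 1).reverse.foldl (pvStepB l) ([], [], none) =
      (((l.take i).map (fun a => PySem.Str.stripChars a "$()`")).reverse,
       (((l.take i).map (fun a => PySem.Str.stripChars a "$()`")).filter
          (fun a => PySem.Str.startswith a "az ")).reverse,
       some (i : Int)) := by
  have hsplit : PySem.List.pyRange 0 (l.length : Int) 1 =
      PySem.List.pyRange 0 ((i : Int) + 1) 1 ++ PySem.List.pyRange ((i : Int) + 1) (l.length : Int) 1 := by
    exact PySem.List.pyRange_one_append 0 ((i : Int) + 1) (l.length : Int) (by positivity) (by exact_mod_cast hi)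
  have hsingle : PySem.List.pyRange 0 ((i : Int) + 1) 1 =
      PySem.List.pyRange 0 (i : Int) 1 ++ [(i : Int)] :=
    PySem.List.pyRange_one_succ_right (a := 0) (b := (i : Int)) (by positivity)
  rw [hsplit, hsingle, List.reverse_append, List.reverse_append, List.foldl_append,
    List.foldl_append]
  have hget : PySem.List.pyGetD l (i : Int) "" = l[i] := by
    rw [PySem.List.pyGetD_natCast]
    simp [List.getD, hi]
  have hreset : ∀ st, (List.reverse [(i : Int)]).foldl (pvStepB l) st = ([], [], some (i : Int)) := by
    intro st
    simp [pvStepB, hget, hop]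
  rw [hreset]
  rw [pvFoldB_no_op l i (by omega) hpre ([], [], some (i : Int))]
  simp

-- ===== VERDICT (by name: the statement is the Claim_ definition above) =====
theorem process_command_args_py_spec : Claim_equal_process_command_args_py := by
  intro l _
  unfold Spec_process_command_args_py process_command_args_py process_command_args_py_alt
  have hrev : PySem.List.pyRange ((l.length : Int) - 1) (-1) (-1) =
      (PySem.List.pyRange 0 (l.length : Int) 1).reverse := by
    rw [PySem.List.pyRange_neg_one_eq_reverse]
    norm_num
  rw [hrev]
  cases hidx : l.findIdx? (fun a => a == "&&" || a == "||") with
  | none =>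
      have hno : ∀ a ∈ l, ¬(a = "&&" ∨ a = "||") := by
        intro a ha
        have := (List.findIdx?_eq_none_iff.mp hidx) a ha
        simpa using this
      rw [pvFoldB_no_op l l.length le_rfl (fun j hj => hno _ (l.getElem_mem hj)) ([], [], none)]
      rw [pvLoopA_no_op l l [] [] hno]
      simp
  | some i =>
      obtain ⟨hi, hp, hj⟩ := List.findIdx?_eq_some_iff_getElem.mp hidx
      have hop : l[i] = "&&" ∨ l[i] = "||" := by simpa using hp
      have hpre' : ∀ j : ℕ, (hji : j < i) → ¬(l[j]'(by omega) = "&&" ∨ l[j]'(by omega) = "||") := by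
        intro j hji
        have := hj j hji
        simpa using this
      have hpre : ∀ a ∈ l.take i, ¬(a = "&&" ∨ a = "||") := by
        intro a ha
        rw [List.mem_take_iff_getElem] at ha
        obtain ⟨j, hjlt, rfl⟩ := ha
        exact hpre' j (lt_of_lt_of_le hjlt (by omega : min i l.length ≤ i))
      have hdecomp : l = l.take i ++ l[i] :: l.drop (i + 1) := by
        rw [List.getElem_cons_drop, List.take_append_drop]
      have hlen : (l.take i).length = i := by simp [List.length_take]; omega
      have hnotmem : l[i] ∉ l.take i := fun hmem => hpre l[i] hmem hop
      have hindex : PySem.List.index? l l[i] = some i := by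
        rw [PySem.List.index?_eq_some_iff l l[i] i]
        exact ⟨l.take i, l.drop (i + 1), hdecomp, hlen, hnotmem⟩
      rw [pvFoldB_op l i hi hop hpre']
      rw [show pvLoopA l l [] [] = pvLoopA l (l.take i ++ l[i] :: l.drop (i + 1)) [] [] from by
        rw [← hdecomp]]
      rw [pvLoopA_op l (l.take i) hpre l[i] hop (l.drop (i + 1)) [] []]
      unfold pvTailA
      rw [hindex]
      dsimp only
      have hslice : PySem.List.slice l (some (i : Int)) none = l.drop i := by
        simp [PySem.List.slice_from]
      rw [hslice]
      simp
      split_ifs <;> simp
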